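-- pv_equiv track=rewrite | github.com/WizardJ0/hdb-price-model | notebooks/feature_analysis.py | get_complexity_score
-- ===== SOURCE A (Python) =====
-- def get_complexity_score(feature_name):
--     """Score complexity from 1-10"""
--     name_lower = feature_name.lower()
--
--     # Engineered features (high complexity)
--     if any(x in name_lower for x in ['interaction', 'proxy', 'score', '_encoded', 'age_lease']):
--         return 8
--     # Time-based features (medium-high)
--     elif any(x in name_lower for x in ['tranc', 'quarter', 'market_regime']):
--         return 6
--     # Spatial features (medium-high)
--     elif any(x in name_lower for x in ['distance', 'nearest', 'lat', 'lon']):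
--         return 7
--     # Amenity features (medium)
--     elif any(x in name_lower for x in ['mall', 'hawker']):
--         return 5
--     # Simple/raw features (low complexity)
--     else:
--         return 3
-- ===== SOURCE B (Python) =====
-- KEYWORD_RANK = {
--     'interaction': 0, 'proxy': 0, 'score': 0, '_encoded': 0, 'age_lease': 0,
--     'tranc': 1, 'quarter': 1, 'market_regime': 1,
--     'distance': 2, 'nearest': 2, 'lat': 2, 'lon': 2,
--     'mall': 3, 'hawker': 3,
-- }
-- RANK_SCORE = [8, 6, 7, 5, 3]
--
-- def get_complexity_score(feature_name):
--     """Score complexity from 1-10"""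
--     name_lower = feature_name.lower()
--     best = 4  # rank 4 = no keyword matched
--     for kw, rank in KEYWORD_RANK.items():
--         if kw in name_lower and rank < best:
--             best = rank
--     return RANK_SCORE[best]
-- ===== Notes on version B (the rewrite author's own statement) =====
-- stated objective: alternative
-- what changed: Instead of an early-return if/elif cascade over keyword groups, B does one exhaustive pass over a flat keyword-to-rank map, aggregating the minimum matched rank with an accumulator, and maps that rank to a score through a lookup table at the end; correct because a group's priority equals its rank, so the minimal matched rank is exactly the first cascade branch that fires.
import Mathlib
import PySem

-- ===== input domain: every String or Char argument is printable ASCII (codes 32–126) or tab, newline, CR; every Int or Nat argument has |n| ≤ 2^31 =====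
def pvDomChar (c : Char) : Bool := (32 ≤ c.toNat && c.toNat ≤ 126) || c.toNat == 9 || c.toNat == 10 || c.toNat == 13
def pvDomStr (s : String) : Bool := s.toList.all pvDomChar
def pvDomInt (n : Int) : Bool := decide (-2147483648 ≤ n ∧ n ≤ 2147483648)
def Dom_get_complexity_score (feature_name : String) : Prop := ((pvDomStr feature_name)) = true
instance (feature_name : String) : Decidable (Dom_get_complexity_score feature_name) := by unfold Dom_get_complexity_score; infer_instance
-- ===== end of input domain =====

-- B replaces A's early-return if/elif cascade with one exhaustive pass over a flat
-- keyword→rank map, keeping the minimum matched rank, then a table lookup: objective 'alternative'.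

-- ===== PORT A =====
def get_complexity_score (feature_name : String) : Int :=
  let name_lower := PySem.Str.lower feature_name
  if ["interaction", "proxy", "score", "_encoded", "age_lease"].any
      (fun x => PySem.Str.isIn x name_lower) then 8
  else if ["tranc", "quarter", "market_regime"].any
      (fun x => PySem.Str.isIn x name_lower) then 6
  else if ["distance", "nearest", "lat", "lon"].any
      (fun x => PySem.Str.isIn x name_lower) then 7
  else if ["mall", "hawker"].any
      (fun x => PySem.Str.isIn x name_lower) then 5
  else 3

-- ===== PORT B =====
-- the KEYWORD_RANK dict of Source B (insertion order)
def pvKeywordRank : List (String × Int) :=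
  [("interaction", 0), ("proxy", 0), ("score", 0), ("_encoded", 0), ("age_lease", 0),
   ("tranc", 1), ("quarter", 1), ("market_regime", 1),
   ("distance", 2), ("nearest", 2), ("lat", 2), ("lon", 2),
   ("mall", 3), ("hawker", 3)]

-- the RANK_SCORE list of Source B
def pvRankScore : List Int := [8, 6, 7, 5, 3]

-- the loop body: 'if kw in name_lower and rank < best: best = rank'
def pvStep (name_lower : String) (best : Int) (p : String × Int) : Int :=
  if PySem.Str.isIn p.1 name_lower ∧ p.2 < best then p.2 else best

def get_complexity_score_alt (feature_name : String) : Int :=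
  let name_lower := PySem.Str.lower feature_name
  let best := pvKeywordRank.foldl (pvStep name_lower) 4
  -- RANK_SCORE[best]: best is always 0..4, so in range; pyGetD is exact here
  PySem.List.pyGetD pvRankScore best 0

-- ===== PRECONDITION & SPEC =====
def Spec_get_complexity_score (feature_name : String) (out : Int) : Prop := out = get_complexity_score_alt feature_name
instance (feature_name : String) (out : Int) : Decidable (Spec_get_complexity_score feature_name out) := by unfold Spec_get_complexity_score; infer_instance

-- ===== CLAIM =====
def Claim_equal_get_complexity_score : Prop := ∀ (feature_name : String), Dom_get_complexity_score feature_name → Spec_get_complexity_score feature_name (get_complexity_score feature_name)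

-- ===== LEMMAS AND PROOFS =====

-- folding a group of keywords that all carry the same rank r: the result is r if some
-- keyword matches and r improves on best, else best is unchanged
theorem pvStep_group (nl : String) (r best : Int) (kws : List String) :
    List.foldl (pvStep nl) best (kws.map (fun k => (k, r))) =
      if kws.any (fun k => PySem.Str.isIn k nl) ∧ r < best then r else best := by
  induction kws generalizing best with
  | nil => simp
  | cons k rest ih =>
    simp only [List.map_cons, List.foldl_cons, List.any_cons, Bool.or_eq_true]
    rw [show pvStep nl best (k, r) =
          if PySem.Str.isIn k nl = true ∧ r < best then r else best from rfl, ih]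
    split_ifs <;> first | rfl | tauto | omega

theorem get_complexity_score_spec : Claim_equal_get_complexity_score := by
  intro s _
  unfold Spec_get_complexity_score get_complexity_score get_complexity_score_alt
  have hsplit : pvKeywordRank =
      (["interaction", "proxy", "score", "_encoded", "age_lease"].map (fun k => (k, (0:Int)))) ++
      (["tranc", "quarter", "market_regime"].map (fun k => (k, (1:Int)))) ++
      (["distance", "nearest", "lat", "lon"].map (fun k => (k, (2:Int)))) ++
      (["mall", "hawker"].map (fun k => (k, (3:Int)))) := by rfl
  rw [hsplit]
  simp only [List.foldl_append, pvStep_group]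
  set nl := PySem.Str.lower s
  by_cases h1 : (["interaction", "proxy", "score", "_encoded", "age_lease"].any (fun k => PySem.Str.isIn k nl)) = true <;>
  by_cases h2 : (["tranc", "quarter", "market_regime"].any (fun k => PySem.Str.isIn k nl)) = true <;>
  by_cases h3 : (["distance", "nearest", "lat", "lon"].any (fun k => PySem.Str.isIn k nl)) = true <;>
  by_cases h4 : (["mall", "hawker"].any (fun k => PySem.Str.isIn k nl)) = true <;>
  simp_all [PySem.List.pyGetD, PySem.List.pyGet?, PySem.List.pyIdx?, pvRankScore]
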